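-- pv_equiv track=rewrite | github.com/PaulineTurk/Projet_MNHN | MNHN/brierNeighbour/selection_example.py | get_bound_position
-- ===== SOURCE A (Python) =====
-- def get_bound_position(len_seq, context_kl, context_kr, context_pl, context_pr):  # à bien couvrir toutes les situations car il y a aussi des courts peptides
--                                                                                   # et on envisage d'aller voir au moins jusqu'à 10 voisins
--     """
--     Bound of position that are valid according to the contextual window defined
--
--     return:
--         valid_interval: ensemble définissant les positions valides selon la fenetre de contexte local choisi
--     """
--     valid_interval = []
--     max_left_window = max(context_kl, context_pl)
--     max_right_window = max(context_kr, context_pr)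
--     for index in range(0, len_seq):
--         if 0 <= index - max_left_window <= len_seq -1 and 0 <= index + max_right_window <= len_seq -1:
--             valid_interval.append(index)
--     valid_interval_ensemble = set(valid_interval) # conversion en ensemble
--
--     return valid_interval_ensemble
-- ===== SOURCE B (Python) =====
-- def get_bound_position(len_seq, context_kl, context_kr, context_pl, context_pr):
--     max_left_window = max(context_kl, context_pl)
--     max_right_window = max(context_kr, context_pr)
--     lo = max(0, max_left_window, -max_right_window)
--     hi = min(len_seq, len_seq + max_left_window, len_seq - max_right_window)
--     return set(range(lo, hi))
-- ===== Notes on version B (the rewrite author's own statement) =====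
-- stated objective: faster
-- what changed: B computes the interval's endpoints arithmetically (lo = max(0, L, -R), hi = min(len, len+L, len-R)) and materialises set(range(lo, hi)), replacing A's per-index loop that tests a four-way window condition for every position.
import Mathlib
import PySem

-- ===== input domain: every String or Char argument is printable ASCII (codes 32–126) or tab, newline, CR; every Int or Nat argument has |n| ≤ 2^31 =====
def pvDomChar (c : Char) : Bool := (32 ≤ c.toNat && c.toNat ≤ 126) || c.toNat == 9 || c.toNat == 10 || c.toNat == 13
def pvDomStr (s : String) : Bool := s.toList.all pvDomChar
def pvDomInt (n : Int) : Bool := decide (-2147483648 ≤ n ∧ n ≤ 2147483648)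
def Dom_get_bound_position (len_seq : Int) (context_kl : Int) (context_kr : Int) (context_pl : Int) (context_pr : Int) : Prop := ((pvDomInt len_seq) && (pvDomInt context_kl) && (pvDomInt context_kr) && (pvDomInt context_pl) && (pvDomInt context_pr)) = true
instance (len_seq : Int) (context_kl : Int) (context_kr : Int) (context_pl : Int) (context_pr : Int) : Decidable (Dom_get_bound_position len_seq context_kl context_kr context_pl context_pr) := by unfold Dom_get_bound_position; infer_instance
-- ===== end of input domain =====

-- B replaces A's per-index loop with direct arithmetic computation of the interval endpoints
-- and a single range materialisation (objective: faster, no per-index testing).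

-- ===== PORT A =====
def get_bound_position (len_seq : Int) (context_kl : Int) (context_kr : Int) (context_pl : Int) (context_pr : Int) : List Int :=
  let max_left_window := max context_kl context_pl
  let max_right_window := max context_kr context_pr
  let valid_interval := (PySem.List.pyRange 0 len_seq 1).foldl
    (fun acc index =>
      if (0 ≤ index - max_left_window ∧ index - max_left_window ≤ len_seq - 1) ∧
         (0 ≤ index + max_right_window ∧ index + max_right_window ≤ len_seq - 1) then
        acc ++ [index]
      else acc) []
  PySem.Set.ofList valid_interval

-- ===== PORT B =====
def get_bound_position_alt (len_seq : Int) (context_kl : Int) (context_kr : Int) (context_pl : Int) (context_pr : Int) : List Int :=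
  let max_left_window := max context_kl context_pl
  let max_right_window := max context_kr context_pr
  let lo := max (max 0 max_left_window) (-max_right_window)
  let hi := min (min len_seq (len_seq + max_left_window)) (len_seq - max_right_window)
  PySem.Set.ofList (PySem.List.pyRange lo hi 1)

-- ===== PRECONDITION & SPEC =====
def Spec_get_bound_position (len_seq : Int) (context_kl : Int) (context_kr : Int) (context_pl : Int) (context_pr : Int) (out : List Int) : Prop := out = get_bound_position_alt len_seq context_kl context_kr context_pl context_pr
instance (len_seq : Int) (context_kl : Int) (context_kr : Int) (context_pl : Int) (context_pr : Int) (out : List Int) : Decidable (Spec_get_bound_position len_seq context_kl context_kr context_pl context_pr out) := by unfold Spec_get_bound_position; infer_instance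

-- ===== CLAIM (what is proved, stated in full; the proofs are below) =====
def Claim_equal_get_bound_position : Prop := ∀ (len_seq : Int) (context_kl : Int) (context_kr : Int) (context_pl : Int) (context_pr : Int), Dom_get_bound_position len_seq context_kl context_kr context_pl context_pr → Spec_get_bound_position len_seq context_kl context_kr context_pl context_pr (get_bound_position len_seq context_kl context_kr context_pl context_pr)

-- ===== LEMMAS AND PROOFS =====

-- filtering an integer range by an interval condition keeps exactly the clipped range
theorem filter_pyRange_interval (l h a b : Int) :
    (PySem.List.pyRange a b 1).filter (fun i => decide (l ≤ i ∧ i < h)) =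
      PySem.List.pyRange (max a l) (min b h) 1 := by
  by_cases hb : b ≤ a
  · rw [PySem.List.pyRange_one_eq_nil hb, PySem.List.pyRange_one_eq_nil (by omega)]
    rfl
  · have hab : a < b := by omega
    have : (b - (a+1)).toNat < (b - a).toNat := by omega
    rw [PySem.List.pyRange_one_cons hab]
    have ih := filter_pyRange_interval l h (a+1) b
    by_cases hp : l ≤ a ∧ a < h
    · have h1 : max a l = a := by omega
      have h2 : max (a+1) l = a + 1 := by omega
      have h3 : a < min b h := by omega
      simp only [List.filter_cons, decide_eq_true_eq, hp, ih, h1, h2,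
        PySem.List.pyRange_one_cons h3]
      simp
    · by_cases hl : a < l
      · have h2 : max (a+1) l = max a l := by omega
        simp only [List.filter_cons, ih, h2]
        simp [hp]
      · -- h ≤ a: both sides empty ranges
        have hh : h ≤ a := by omega
        simp only [List.filter_cons, ih]
        rw [PySem.List.pyRange_one_eq_nil (by omega), PySem.List.pyRange_one_eq_nil (by omega)]
        simp [hp]
termination_by (b - a).toNat
decreasing_by omega

-- ===== VERDICT (by name: the statement is the Claim_ definition above) =====
theorem get_bound_position_spec : Claim_equal_get_bound_position := by
  intro n kl kr pl pr _
  unfold Spec_get_bound_position get_bound_position get_bound_position_alt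
  set L := max kl pl with hL
  set R := max kr pr with hR
  simp only []
  congr 1
  rw [PySem.List.foldl_append_ite_eq_filter]
  rw [List.filter_congr (l := PySem.List.pyRange 0 n 1)
      (q := fun i => decide (max L (-R) ≤ i ∧ i < min (n + L) (n - R)))
      (fun i _ => by simp only [decide_eq_decide]; omega)]
  rw [filter_pyRange_interval]
  have e1 : max 0 (max L (-R)) = max (max 0 L) (-R) := by omega
  have e2 : min n (min (n + L) (n - R)) = min (min n (n + L)) (n - R) := by omega
  rw [e1, e2]
  simp
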